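-- pv_equiv track=rewrite | github.com/SpikedJackson/AdventOfCode2023 | day3.py | build_number
-- ===== SOURCE A (Python) =====
-- def build_number(newlines, i, j):
--     if not newlines[i][j].isnumeric():
--         return 0
--     string = newlines[i][j]
--     k = j - 1
--     while 0 <= k and newlines[i][k].isnumeric():
--         string = newlines[i][k] + string
--         k -= 1
--     k = j + 1
--     while k < len(newlines[i]) and newlines[i][k].isnumeric():
--         string = string + newlines[i][k]
--         k += 1
--     return int(string)
-- ===== SOURCE B (Python) =====
-- def build_number(newlines, i, j):
--     # Quick reject: no number spans column j unless the character there is numeric.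
--     row = newlines[i]
--     if not row[j].isnumeric():
--         return 0
--     # Single left-to-right pass collecting maximal numeric runs as spans,
--     # then return the int of the span containing column j (0 if none).
--     spans = []
--     start = None
--     for idx in range(len(row)):
--         if row[idx].isnumeric():
--             if start is None:
--                 start = idx
--         else:
--             if start is not None:
--                 spans.append((start, idx - 1, row[start:idx]))
--                 start = None
--     if start is not None:
--         spans.append((start, len(row) - 1, row[start:]))
--     for (s, e, sub) in spans:
--         if s <= j <= e:
--             return int(sub)
--     return 0
-- ===== Notes on version B (the rewrite author's own statement) =====
-- stated objective: alternative
-- what changed: Replaces A's outward two-while-loop scan around j with a single left-to-right pass that groups maximal numeric runs into (start, end, substring) spans, followed by a lookup of the span containing j.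
-- intended difference: For in-range negative j whose wrapped scan actually reaches a nonzero digit, A wraps the initial character read but then scans rightwards from the raw offset j+1 (wrapping again), returning a spurious positive re-concatenation (e.g. 55 for (['5'], 0, -1)); B returns 0, the intended 'no number spans a negative column' (day 3 calls this helper with j-1, which is -1 at the left edge). — e.g. on build_number(["5"], 0, -1): A returns 55, B returns 0
import Mathlib
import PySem

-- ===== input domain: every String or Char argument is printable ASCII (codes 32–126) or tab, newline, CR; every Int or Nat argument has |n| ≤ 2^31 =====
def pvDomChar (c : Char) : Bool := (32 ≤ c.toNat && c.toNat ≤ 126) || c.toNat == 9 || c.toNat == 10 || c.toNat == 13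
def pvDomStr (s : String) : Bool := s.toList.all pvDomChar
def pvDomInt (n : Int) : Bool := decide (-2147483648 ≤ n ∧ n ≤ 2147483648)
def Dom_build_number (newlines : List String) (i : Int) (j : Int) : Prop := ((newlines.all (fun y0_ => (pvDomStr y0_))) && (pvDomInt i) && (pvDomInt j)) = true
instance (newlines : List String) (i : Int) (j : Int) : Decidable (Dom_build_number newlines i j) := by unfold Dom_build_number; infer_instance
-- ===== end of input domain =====

-- B replaces A's outward two-while scan with a one-pass grouping of maximal digit runs
-- into spans plus a span lookup (objective: alternative decomposition, same cost).
-- On the ASCII domain Dom, Python's str.isnumeric coincides with Chars.isdigit (exact there).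

-- ===== PORT A =====
-- int(string), ported by hand: under Dom every string either program passes to int() is a
-- nonempty run of ASCII digits '0'..'9' (isnumeric admits exactly those there), where
-- Python's int() is plain base-10; exact on that domain.
def bnIntOfDigits (ds : List Char) : Int :=
  ds.foldl (fun acc c => 10 * acc + ((c.toNat : Int) - 48)) 0

-- left while loop: 'while 0 <= k and newlines[i][k].isnumeric(): string = char + string; k -= 1'
-- (structural transcription: the loop counter is m = k + 1, so 'm = 0' is exactly '¬ 0 ≤ k')
def bnLeft (cs : List Char) (m : Nat) (s : List Char) : List Char :=
  match m with
  | 0 => s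
  | m' + 1 =>
    match PySem.List.pyGet? cs (m' : Int) with
    | some c => if PySem.Chars.isdigit c then bnLeft cs m' (c :: s) else s
    | none => s  -- unreachable while scanning left of a valid index

-- right while loop: 'while k < len(newlines[i]) and newlines[i][k].isnumeric(): string = string + char; k += 1'
-- (structural transcription: fuel = (len - k).toNat encodes the guard 'k < len'; k itself is
--  passed unchanged to pyGet?, so negative k wraps exactly as in Python)
def bnRight (cs : List Char) (k : Int) (fuel : Nat) (s : List Char) : List Char :=
  match fuel with
  | 0 => s
  | f + 1 =>
    match PySem.List.pyGet? cs k with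
    | some c => if PySem.Chars.isdigit c then bnRight cs (k + 1) f (s ++ [c]) else s
    | none => s  -- only reachable when k ≥ len inside leftover fuel: loop exit, same result

def build_number (newlines : List String) (i : Int) (j : Int) : Int :=
  match PySem.List.pyGet? newlines i with
  | none => 0  -- IndexError (outside Pre_)
  | some row =>
    match PySem.List.pyGet? row.toList j with
    | none => 0  -- IndexError (outside Pre_)
    | some c =>
      if PySem.Chars.isdigit c then
        bnIntOfDigits (bnRight row.toList (j + 1) (((row.toList.length : Int)) - (j + 1)).toNat
            (bnLeft row.toList j.toNat [c]))
      else 0  -- 'if not …isnumeric(): return 0'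

-- ===== PORT B =====
-- one pass over the row, collecting maximal numeric runs as (start, end, substring) spans
def bnSpans (cs : List Char) (idx : Nat) (rest : List Char)
    (spans : List (Nat × Nat × List Char)) (start : Option Nat) : List (Nat × Nat × List Char) :=
  match rest with
  | [] =>
    match start with
    | some s => spans ++ [(s, cs.length - 1, PySem.List.slice cs (some (s : Int)) none)]
    | none => spans
  | ch :: rest' =>
    if PySem.Chars.isdigit ch then
      match start with
      | some s => bnSpans cs (idx + 1) rest' spans (some s)
      | none => bnSpans cs (idx + 1) rest' spans (some idx)
    else
      match start with
      | some s => bnSpans cs (idx + 1) rest'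
          (spans ++ [(s, idx - 1, PySem.List.slice cs (some (s : Int)) (some (idx : Int)))]) none
      | none => bnSpans cs (idx + 1) rest' spans none

-- 'for (s, e, sub) in spans: if s <= j <= e: return int(sub)' / 'return 0'
def bnFind (j : Int) : List (Nat × Nat × List Char) → Int
  | [] => 0
  | (s, e, sub) :: rest =>
    if (s : Int) ≤ j ∧ j ≤ (e : Int) then bnIntOfDigits sub else bnFind j rest

def build_number_alt (newlines : List String) (i : Int) (j : Int) : Int :=
  match PySem.List.pyGet? newlines i with
  | none => 0  -- IndexError (outside Pre_)
  | some row =>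
    match PySem.List.pyGet? row.toList j with
    | none => 0  -- IndexError (outside Pre_)
    | some c =>
      if PySem.Chars.isdigit c then bnFind j (bnSpans row.toList 0 row.toList [] none)
      else 0  -- 'if not row[j].isnumeric(): return 0'

-- ===== PRECONDITION & SPEC =====
-- A raises IndexError iff i is out of range for newlines or j is out of range for row i.
def Pre_build_number (newlines : List String) (i : Int) (j : Int) : Prop :=
  PySem.Raise.InRange newlines.length i ∧
  PySem.Raise.InRange (PySem.List.pyGetD newlines i "").toList.length j

instance (newlines : List String) (i : Int) (j : Int) : Decidable (Pre_build_number newlines i j) := by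
  unfold Pre_build_number; infer_instance

def pvWitness_build_number : List String × Int × Int := (["a12b"], 0, 2)

-- For in-range negative j whose wrapped scan actually reaches a nonzero digit, A wraps the
-- initial character read but then scans rightwards from the raw offset j+1 (wrapping again),
-- returning a spurious positive re-concatenation (e.g. 55 for (['5'], 0, -1)); B returns 0,
-- the intended 'no number spans a negative column' (day 3 calls this helper with j-1, which
-- is -1 at the left edge).
-- row i of the grid and its character at offset t from column j (both via Python indexing)
def bnRowLen (newlines : List String) (i : Int) : Nat :=
  (PySem.List.pyGetD newlines i "").toList.length

def bnRowD (newlines : List String) (i : Int) (j : Int) (t : Nat) : Char :=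
  PySem.List.pyGetD (PySem.List.pyGetD newlines i "").toList (j + (t : Int)) ' '

def D_build_number (newlines : List String) (i : Int) (j : Int) : Prop :=
  j < 0 ∧ PySem.Raise.InRange newlines.length i ∧
  PySem.Raise.InRange (bnRowLen newlines i) j ∧
  ((List.range (((bnRowLen newlines i : Int)) - j).toNat).any (fun m =>
      (bnRowD newlines i j m != '0')
      && (List.range (m + 1)).all (fun t => PySem.Chars.isdigit (bnRowD newlines i j t)))) = true

instance (newlines : List String) (i : Int) (j : Int) : Decidable (D_build_number newlines i j) := by
  unfold D_build_number; infer_instance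

def Spec_build_number (newlines : List String) (i : Int) (j : Int) (out : Int) : Prop :=
  ¬ D_build_number newlines i j → out = build_number_alt newlines i j
instance (newlines : List String) (i : Int) (j : Int) (out : Int) : Decidable (Spec_build_number newlines i j out) := by
  unfold Spec_build_number; infer_instance

def pvDiffWitness_build_number : List String × Int × Int := (["5"], 0, -1)
def pvDiffWitnessOut_build_number : Int × Int := (55, 0)

-- ===== CLAIM (what is proved, stated in full; the proofs are below) =====
def Claim_unchanged_build_number : Prop := ∀ (newlines : List String) (i : Int) (j : Int), Dom_build_number newlines i j → Pre_build_number newlines i j → Spec_build_number newlines i j (build_number newlines i j)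
def Claim_changed_build_number : Prop := Dom_build_number (pvDiffWitness_build_number.1) (pvDiffWitness_build_number.2.1) (pvDiffWitness_build_number.2.2) ∧ Pre_build_number (pvDiffWitness_build_number.1) (pvDiffWitness_build_number.2.1) (pvDiffWitness_build_number.2.2) ∧ D_build_number (pvDiffWitness_build_number.1) (pvDiffWitness_build_number.2.1) (pvDiffWitness_build_number.2.2) ∧ build_number (pvDiffWitness_build_number.1) (pvDiffWitness_build_number.2.1) (pvDiffWitness_build_number.2.2) = pvDiffWitnessOut_build_number.1 ∧ build_number_alt (pvDiffWitness_build_number.1) (pvDiffWitness_build_number.2.1) (pvDiffWitness_build_number.2.2) = pvDiffWitnessOut_build_number.2 ∧ pvDiffWitnessOut_build_number.1 ≠ pvDiffWitnessOut_build_number.2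
def Claim_exact_build_number : Prop := ∀ (newlines : List String) (i : Int) (j : Int), Dom_build_number newlines i j → Pre_build_number newlines i j → D_build_number newlines i j → build_number newlines i j ≠ build_number_alt newlines i j

-- ===== LEMMAS AND PROOFS =====

-- A's left loop prepends exactly the maximal digit suffix of the first m characters.
theorem bnLeft_eq (cs : List Char) (m : Nat) (s : List Char) (hm : m ≤ cs.length) :
    bnLeft cs m s
      = ((cs.take m).reverse.takeWhile PySem.Chars.isdigit).reverse ++ s := by
  induction m generalizing s with
  | zero => simp [bnLeft]
  | succ m ih =>
    have hm' : m < cs.length := by omega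
    rw [bnLeft, PySem.List.pyGet?_ofNat cs m hm', List.take_succ, List.getElem?_eq_getElem hm']
    dsimp only
    have h1 : (List.take m cs ++ (some cs[m]).toList).reverse = cs[m] :: (List.take m cs).reverse := by
      simp
    by_cases hd : PySem.Chars.isdigit cs[m] = true
    · rw [if_pos hd, ih _ (by omega), h1, List.takeWhile_cons, if_pos hd, List.reverse_cons,
        List.append_assoc]
      rfl
    · rw [if_neg hd, h1, List.takeWhile_cons, if_neg hd]
      simp

-- A's right loop appends exactly the maximal digit prefix from position m on.
theorem bnRight_eq (cs : List Char) (f m : Nat) (s : List Char) (hf : cs.length ≤ m + f) :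
    bnRight cs (m : Int) f s = s ++ (cs.drop m).takeWhile PySem.Chars.isdigit := by
  induction f generalizing m s with
  | zero =>
    rw [bnRight, List.drop_of_length_le (by omega)]
    simp
  | succ f ih =>
    by_cases hm : m < cs.length
    · rw [bnRight, PySem.List.pyGet?_ofNat cs m hm, List.drop_eq_getElem_cons hm]
      dsimp only
      by_cases hd : PySem.Chars.isdigit cs[m] = true
      · rw [if_pos hd]
        have hc : ((m : Int) + 1) = ((m + 1 : Nat) : Int) := by omega
        rw [hc, ih _ _ (by omega), List.takeWhile_cons, if_pos hd, List.append_assoc]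
        rfl
      · rw [if_neg hd, List.takeWhile_cons, if_neg hd]
        simp
    · rw [bnRight]
      have hnone : PySem.List.pyGet? cs (m : Int) = none := by
        rw [PySem.List.pyGet?_eq_none_iff, PySem.Raise.InRange]
        omega
      rw [hnone, List.drop_of_length_le (by omega)]
      dsimp only
      simp

-- bnSpans only appends to the accumulated span list.
theorem bnSpans_append (cs : List Char) (rest : List Char) :
    ∀ (idx : Nat) (spans : List (Nat × Nat × List Char)) (start : Option Nat),
    bnSpans cs idx rest spans start = spans ++ bnSpans cs idx rest [] start := by
  induction rest with
  | nil => intro idx spans start; cases start <;> simp [bnSpans]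
  | cons ch rest ih =>
    intro idx spans start
    by_cases hd : PySem.Chars.isdigit ch = true
    · cases start <;> simp only [bnSpans, hd, ite_true] <;> rw [ih]
    · cases start with
      | none => simp only [bnSpans, hd, Bool.false_eq_true, ite_false]; rw [ih]
      | some s =>
        simp only [bnSpans, hd, Bool.false_eq_true, ite_false, List.nil_append]
        rw [ih, ih (spans := [_]), List.append_assoc]

-- spans that do not contain j are skipped by bnFind.
theorem bnFind_append_miss (j : Int) (spans X : List (Nat × Nat × List Char))
    (h : ∀ p ∈ spans, ¬((p.1 : Int) ≤ j ∧ j ≤ (p.2.1 : Int))) :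
    bnFind j (spans ++ X) = bnFind j X := by
  induction spans with
  | nil => simp
  | cons p rest ih =>
    obtain ⟨s, e, sub⟩ := p
    have := h (s, e, sub) (by simp)
    simpa [bnFind, this] using ih (fun q hq => h q (by simp [hq]))

theorem bnFind_neg (j : Int) (hj : j < 0) (spans : List (Nat × Nat × List Char)) :
    bnFind j spans = 0 := by
  induction spans with
  | nil => rfl
  | cons p rest ih =>
    obtain ⟨s, e, sub⟩ := p
    have : ¬((s : Int) ≤ j ∧ j ≤ (e : Int)) := by omega
    simp [bnFind, this, ih]

theorem head?_dropWhile {p : Char → Bool} :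
    ∀ (l : List Char) (x : Char), (l.dropWhile p).head? = some x → p x = false := by
  intro l
  induction l with
  | nil => simp
  | cons a l ih =>
    intro x h
    by_cases hp : p a = true
    · exact ih x (by simpa [List.dropWhile_cons, hp] using h)
    · rw [List.dropWhile_cons, if_neg (by simp [hp])] at h
      simp at h
      simpa [← h] using hp

-- scanning a digit block keeps the open run.
theorem bnSpans_digits (cs : List Char) (a : Nat) (ds : List Char)
    (hds : ∀ x ∈ ds, PySem.Chars.isdigit x = true) :
    ∀ (rest : List Char) (idx : Nat),
    bnSpans cs idx (ds ++ rest) [] (some a) = bnSpans cs (idx + ds.length) rest [] (some a) := by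
  induction ds with
  | nil => intro rest idx; simp
  | cons x ds ih =>
    intro rest idx
    have hx := hds x (by simp)
    rw [List.cons_append, bnSpans]
    simp only [hx, if_pos]
    rw [ih (fun y hy => hds y (by simp [hy]))]
    congr 1
    simp; omega

-- scanning a block that ends in a non-digit (with spans all left of jn) is invisible to bnFind at jn.
theorem bnSpans_pre (cs : List Char) (jn : Nat) :
    ∀ (P' rest : List Char) (idx : Nat) (start : Option Nat),
    idx + P'.length ≤ jn →
    (P' = [] → start = none) →
    (∀ x, P'.getLast? = some x → PySem.Chars.isdigit x = false) →
    bnFind (jn : Int) (bnSpans cs idx (P' ++ rest) [] start)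
      = bnFind (jn : Int) (bnSpans cs (idx + P'.length) rest [] none) := by
  intro P'
  induction P' with
  | nil =>
    intro rest idx start h1 h2 h3
    rw [h2 rfl]; simp
  | cons x P'' ih =>
    intro rest idx start h1 h2 h3
    have h3' : ∀ z, P''.getLast? = some z → PySem.Chars.isdigit z = false := by
      intro z hz
      cases P'' with
      | nil => simp at hz
      | cons y P₃ => exact h3 z (by rw [List.getLast?_cons_cons]; exact hz)
    have hlen : idx + 1 + P''.length = idx + (x :: P'').length := by simp; omega
    by_cases hd : PySem.Chars.isdigit x = true
    · cases P'' with
      | nil => exact absurd (h3 x (by simp)) (by simp [hd])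
      | cons y P₃ =>
        cases start with
        | some s =>
          rw [List.cons_append, bnSpans]
          simp only [hd, ite_true]
          rw [ih rest (idx + 1) (some s) (by simp at h1 ⊢; omega) (by simp) h3', hlen]
        | none =>
          rw [List.cons_append, bnSpans]
          simp only [hd, ite_true]
          rw [ih rest (idx + 1) (some idx) (by simp at h1 ⊢; omega) (by simp) h3', hlen]
    · cases start with
      | none =>
        rw [List.cons_append, bnSpans]
        simp only [hd, Bool.false_eq_true, ite_false]
        rw [ih rest (idx + 1) none (by simp at h1 ⊢; omega) (fun _ => rfl) h3', hlen]
      | some s =>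
        rw [List.cons_append, bnSpans]
        simp only [hd, Bool.false_eq_true, ite_false, List.nil_append]
        rw [bnSpans_append, bnFind_append_miss]
        · rw [ih rest (idx + 1) none (by simp at h1 ⊢; omega) (fun _ => rfl) h3', hlen]
        · intro p hp
          simp only [List.mem_singleton] at hp
          subst hp
          simp only at h1 ⊢
          omega

-- a nonempty all-digit block opens a run at its first position and keeps it.
theorem bnSpans_run (cs : List Char) (a : Nat) :
    ∀ (run : List Char), run ≠ [] → (∀ x ∈ run, PySem.Chars.isdigit x = true) → ∀ (S' : List Char),
    bnSpans cs a (run ++ S') [] none = bnSpans cs (a + run.length) S' [] (some a) := by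
  intro run hne hdig S'
  cases run with
  | nil => exact absurd rfl hne
  | cons r0 rt =>
    rw [List.cons_append, bnSpans]
    simp only [hdig r0 (by simp), ite_true]
    rw [bnSpans_digits cs a rt (fun y hy => hdig y (by simp [hy])) S' (a + 1)]
    congr 1
    simp
    omega

-- decomposition facts around position jn
theorem run_decomp (cs : List Char) (jn : Nat) (h : jn < cs.length) :
    cs = ((cs.take jn).reverse.dropWhile PySem.Chars.isdigit).reverse
          ++ (((cs.take jn).reverse.takeWhile PySem.Chars.isdigit).reverse
              ++ cs[jn] :: cs.drop (jn + 1)) := by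
  have h1 : (cs.take jn).reverse.takeWhile PySem.Chars.isdigit
      ++ (cs.take jn).reverse.dropWhile PySem.Chars.isdigit = (cs.take jn).reverse :=
    List.takeWhile_append_dropWhile
  have h2 : ((cs.take jn).reverse.dropWhile PySem.Chars.isdigit).reverse
      ++ ((cs.take jn).reverse.takeWhile PySem.Chars.isdigit).reverse = cs.take jn := by
    rw [← List.reverse_append, h1, List.reverse_reverse]
  calc cs = cs.take jn ++ cs.drop jn := (List.take_append_drop jn cs).symm
    _ = cs.take jn ++ cs[jn] :: cs.drop (jn + 1) := by rw [List.drop_eq_getElem_cons h]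
    _ = _ := by conv_lhs => rw [← h2, List.append_assoc]

theorem length_decomp (cs : List Char) (jn : Nat) (h : jn < cs.length) :
    ((cs.take jn).reverse.dropWhile PySem.Chars.isdigit).reverse.length
      + ((cs.take jn).reverse.takeWhile PySem.Chars.isdigit).length = jn := by
  have h1 : (cs.take jn).reverse.takeWhile PySem.Chars.isdigit
      ++ (cs.take jn).reverse.dropWhile PySem.Chars.isdigit = (cs.take jn).reverse :=
    List.takeWhile_append_dropWhile
  have := congrArg List.length h1
  simp only [List.length_append, List.length_reverse, List.length_take] at this
  simp only [List.length_reverse]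
  omega

theorem lastP'_nondigit (cs : List Char) (jn : Nat) :
    ∀ x, ((cs.take jn).reverse.dropWhile PySem.Chars.isdigit).reverse.getLast? = some x →
      PySem.Chars.isdigit x = false := by
  intro x hx
  rw [List.getLast?_reverse] at hx
  exact head?_dropWhile _ x hx

-- B returns the int of the maximal digit run around a digit position jn.
theorem bnB_digit (cs : List Char) (jn : Nat) (h : jn < cs.length)
    (hd : PySem.Chars.isdigit cs[jn] = true) :
    bnFind (jn : Int) (bnSpans cs 0 cs [] none)
      = bnIntOfDigits (((cs.take jn).reverse.takeWhile PySem.Chars.isdigit).reverse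
          ++ cs[jn] :: (cs.drop (jn + 1)).takeWhile PySem.Chars.isdigit) := by
  have hsplit := run_decomp cs jn h
  have hlen := length_decomp cs jn h
  have hS : (cs.drop (jn + 1)).takeWhile PySem.Chars.isdigit
      ++ (cs.drop (jn + 1)).dropWhile PySem.Chars.isdigit = cs.drop (jn + 1) :=
    List.takeWhile_append_dropWhile
  set P' := ((cs.take jn).reverse.dropWhile PySem.Chars.isdigit).reverse with hP'
  set pref := (cs.take jn).reverse.takeWhile PySem.Chars.isdigit with hpref
  set suff := (cs.drop (jn + 1)).takeWhile PySem.Chars.isdigit with hsuff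
  set S' := (cs.drop (jn + 1)).dropWhile PySem.Chars.isdigit with hS'
  set run := pref.reverse ++ cs[jn] :: suff with hrun
  have hrunlen : run.length = pref.length + 1 + suff.length := by simp [hrun]; omega
  have hcs2 : cs = P' ++ (run ++ S') := by
    rw [hsplit]; rw [hrun]; rw [← hS]; simp [List.append_assoc]
  have hrundig : ∀ x ∈ run, PySem.Chars.isdigit x = true := by
    intro x hx
    rw [hrun] at hx
    simp only [List.mem_append, List.mem_reverse, List.mem_cons] at hx
    rcases hx with hx | hx | hx
    · exact List.mem_takeWhile_imp hx
    · rw [hx]; exact hd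
    · exact List.mem_takeWhile_imp hx
  have step1 : bnFind (jn : Int) (bnSpans cs 0 cs [] none)
      = bnFind (jn : Int) (bnSpans cs P'.length (run ++ S') [] none) := by
    nth_rewrite 2 [hcs2]
    rw [bnSpans_pre cs jn P' (run ++ S') 0 none (by omega) (fun _ => rfl) (lastP'_nondigit cs jn)]
    norm_num
  rw [step1, bnSpans_run cs P'.length run (by simp [hrun]) hrundig S']
  cases hS'c : S' with
  | nil =>
    rw [bnSpans]
    simp only [bnFind, List.nil_append]
    rw [if_pos (by constructor <;> omega)]
    have hdrop : cs.drop P'.length = run := by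
      rw [hcs2, hS'c, List.append_nil, List.drop_left]
    rw [PySem.List.slice_from_natCast, hdrop]
  | cons x S'' =>
    rw [bnSpans]
    have hx : PySem.Chars.isdigit x = false := head?_dropWhile _ x (by rw [← hS', hS'c]; rfl)
    simp only [hx, Bool.false_eq_true, ite_false, List.nil_append]
    rw [bnSpans_append]
    simp only [bnFind, List.cons_append]
    rw [if_pos (by constructor <;> omega)]
    have hdrop : cs.drop P'.length = run ++ S' := by rw [hcs2, List.drop_left]
    rw [PySem.List.slice_natCast, hdrop]
    have : P'.length + run.length - P'.length = run.length := by omega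
    rw [this, List.take_left]

-- arithmetic facts about the hand-ported int()
theorem digit_bounds (c : Char) (h : PySem.Chars.isdigit c = true) :
    48 ≤ c.toNat ∧ c.toNat ≤ 57 := by
  simp [PySem.Chars.isdigit] at h
  exact ⟨h.1, h.2⟩

theorem digit_ne_zero (c : Char) (h : PySem.Chars.isdigit c = true) (h0 : c ≠ '0') :
    49 ≤ c.toNat := by
  have hb := digit_bounds c h
  rcases Nat.eq_or_lt_of_le hb.1 with he | hl
  · exfalso
    apply h0
    apply Char.ext
    apply UInt32.toNat_inj.mp
    exact he.symm
  · omega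

theorem intOfDigits_mono : ∀ (ds : List Char) (acc : Int), 0 ≤ acc →
    (∀ x ∈ ds, PySem.Chars.isdigit x = true) →
    acc ≤ ds.foldl (fun acc c => 10 * acc + ((c.toNat : Int) - 48)) acc := by
  intro ds
  induction ds with
  | nil => intro acc h _; exact le_refl acc
  | cons c ds ih =>
    intro acc hacc hd
    have hb := digit_bounds c (hd c (by simp))
    have h1 : acc ≤ 10 * acc + ((c.toNat : Int) - 48) := by omega
    exact le_trans h1 (ih _ (by omega) (fun x hx => hd x (by simp [hx])))

theorem intOfDigits_pos (ds : List Char) (hds : ∀ x ∈ ds, PySem.Chars.isdigit x = true)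
    (x : Char) (hx : x ∈ ds) (hxne : x ≠ '0') : 1 ≤ bnIntOfDigits ds := by
  obtain ⟨u, v, rfl⟩ := List.append_of_mem hx
  unfold bnIntOfDigits
  rw [List.foldl_append]
  have ha : (0 : Int) ≤ u.foldl (fun acc c => 10 * acc + ((c.toNat : Int) - 48)) 0 :=
    intOfDigits_mono u 0 le_rfl (fun y hy => hds y (by simp [hy]))
  have hdx : 49 ≤ x.toNat := digit_ne_zero x (hds x (by simp)) hxne
  have h1 : (1 : Int) ≤ 10 * u.foldl (fun acc c => 10 * acc + ((c.toNat : Int) - 48)) 0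
      + ((x.toNat : Int) - 48) := by omega
  calc (1 : Int) ≤ _ := h1
    _ ≤ _ := intOfDigits_mono v _ (by omega) (fun y hy => hds y (by simp [hy]))

theorem intOfDigits_zero : ∀ (ds : List Char), (∀ x ∈ ds, x = '0') → bnIntOfDigits ds = 0 := by
  have go : ∀ (ds : List Char), (∀ x ∈ ds, x = '0') →
      ds.foldl (fun acc c => 10 * acc + ((c.toNat : Int) - 48)) 0 = 0 := by
    intro ds
    induction ds with
    | nil => intro _; rfl
    | cons c ds ih =>
      intro h
      have hc : c = '0' := h c (by simp)
      subst hc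
      simpa using ih (fun x hx => h x (by simp [hx]))
  exact go

-- a pyGet? hit pins the index in range and agrees with pyGetD
theorem pyGet?_inrange {α : Type} (xs : List α) (k : Int) (c : α)
    (h : PySem.List.pyGet? xs k = some c) : -(xs.length : Int) ≤ k ∧ k < xs.length := by
  by_contra hc
  rw [← PySem.Raise.InRange] at hc
  rw [← PySem.List.pyGet?_eq_none_iff] at hc
  rw [h] at hc
  simp at hc

theorem pyGet?_eq_some_getD {α : Type} (xs : List α) (k : Int) (d : α)
    (h : -(xs.length : Int) ≤ k ∧ k < xs.length) :
    PySem.List.pyGet? xs k = some (PySem.List.pyGetD xs k d) := by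
  rcases hq : PySem.List.pyGet? xs k with _ | c
  · rw [PySem.List.pyGet?_eq_none_iff, PySem.Raise.InRange] at hq
    exact absurd h hq
  · have : PySem.List.pyGetD xs k d = c := by simp [PySem.List.pyGetD, hq]
    rw [this]

-- A's right loop only grows the string
theorem bnRight_prefix (cs : List Char) :
    ∀ (fuel : Nat) (k : Int) (s : List Char), ∃ t, bnRight cs k fuel s = s ++ t := by
  intro fuel
  induction fuel with
  | zero => intro k s; exact ⟨[], by simp [bnRight]⟩
  | succ f ih =>
    intro k s
    rcases hq : PySem.List.pyGet? cs k with _ | c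
    · exact ⟨[], by simp [bnRight, hq]⟩
    · by_cases hd : PySem.Chars.isdigit c = true
      · obtain ⟨t, ht⟩ := ih (k + 1) (s ++ [c])
        exact ⟨[c] ++ t, by rw [bnRight, hq]; dsimp only; rw [if_pos hd, ht, List.append_assoc]⟩
      · exact ⟨[], by rw [bnRight, hq]; dsimp only; rw [if_neg hd]; simp⟩

-- every character the right loop appends passed the digit test
theorem bnRight_digits (cs : List Char) :
    ∀ (fuel : Nat) (k : Int) (s : List Char), (∀ y ∈ s, PySem.Chars.isdigit y = true) →
    ∀ x ∈ bnRight cs k fuel s, PySem.Chars.isdigit x = true := by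
  intro fuel
  induction fuel with
  | zero => intro k s hs x hx; exact hs x (by simpa [bnRight] using hx)
  | succ f ih =>
    intro k s hs x hx
    rw [bnRight] at hx
    rcases hq : PySem.List.pyGet? cs k with _ | c <;> rw [hq] at hx <;> dsimp only at hx
    · exact hs x hx
    · by_cases hd : PySem.Chars.isdigit c = true
      · rw [if_pos hd] at hx
        refine ih (k + 1) (s ++ [c]) ?_ x hx
        intro y hy
        rcases List.mem_append.mp hy with h | h
        · exact hs y h
        · simp at h; rw [h]; exact hd
      · rw [if_neg hd] at hx
        exact hs x hx

-- every character of the right loop's result is in s or sits at a scanned position whose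
-- whole scan prefix is digits
theorem bnRight_mem (cs : List Char) :
    ∀ (fuel : Nat) (k : Int) (s : List Char) (x : Char), x ∈ bnRight cs k fuel s →
    x ∈ s ∨ ∃ t : Nat, k + (t : Int) < cs.length ∧ x = PySem.List.pyGetD cs (k + (t : Int)) ' ' ∧
      ∀ u : Nat, u ≤ t → PySem.Chars.isdigit (PySem.List.pyGetD cs (k + (u : Int)) ' ') = true := by
  intro fuel
  induction fuel with
  | zero => intro k s x hx; exact Or.inl (by simpa [bnRight] using hx)
  | succ f ih =>
    intro k s x hx
    rw [bnRight] at hx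
    rcases hq : PySem.List.pyGet? cs k with _ | c <;> rw [hq] at hx <;> dsimp only at hx
    · exact Or.inl hx
    · by_cases hd : PySem.Chars.isdigit c = true
      · rw [if_pos hd] at hx
        have hk := pyGet?_inrange cs k c hq
        have hgd : PySem.List.pyGetD cs k ' ' = c := by simp [PySem.List.pyGetD, hq]
        rcases ih (k + 1) (s ++ [c]) x hx with hxs | ⟨t, h1, h2, h3⟩
        · rcases List.mem_append.mp hxs with h | h
          · exact Or.inl h
          · simp at h
            refine Or.inr ⟨0, by simpa using hk.2, ?_, ?_⟩
            · rw [h]; simp [hgd]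
            · intro u hu
              have : u = 0 := by omega
              rw [this]
              simpa [hgd] using hd
        · refine Or.inr ⟨t + 1, ?_, ?_, ?_⟩
          · have hcast : k + ((t + 1 : Nat) : Int) = k + 1 + (t : Int) := by push_cast; ring
            rw [hcast]; exact h1
          · have hcast : k + ((t + 1 : Nat) : Int) = k + 1 + (t : Int) := by push_cast; ring
            rw [hcast]; exact h2
          · intro u hu
            cases u with
            | zero => simpa [hgd] using hd
            | succ v =>
              have hcast : k + ((v + 1 : Nat) : Int) = k + 1 + (v : Int) := by push_cast; ring
              rw [hcast]
              exact h3 v (by omega)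
      · rw [if_neg hd] at hx
        exact Or.inl hx

-- with enough fuel and an all-digit prefix, the right loop reaches position k + m
theorem bnRight_reaches (cs : List Char) :
    ∀ (m : Nat) (k : Int) (fuel : Nat) (s : List Char),
    -(cs.length : Int) ≤ k → k + (m : Int) < cs.length → (cs.length : Int) - k ≤ (fuel : Int) →
    (∀ t : Nat, t ≤ m → PySem.Chars.isdigit (PySem.List.pyGetD cs (k + (t : Int)) ' ') = true) →
    PySem.List.pyGetD cs (k + (m : Int)) ' ' ∈ bnRight cs k fuel s := by
  intro m
  induction m with
  | zero =>
    intro k fuel s hk1 hk2 hfuel hdig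
    simp only [Nat.cast_zero, add_zero] at hk2 ⊢
    cases fuel with
    | zero => exfalso; simp at hfuel; omega
    | succ f =>
      have hq := pyGet?_eq_some_getD cs k ' ' ⟨hk1, hk2⟩
      rw [bnRight, hq]
      dsimp only
      rw [if_pos (by simpa using hdig 0 (le_refl 0))]
      obtain ⟨t, ht⟩ := bnRight_prefix cs f (k + 1) (s ++ [PySem.List.pyGetD cs k ' '])
      rw [ht]
      simp
  | succ m ih =>
    intro k fuel s hk1 hk2 hfuel hdig
    have hklt : k < (cs.length : Int) := by
      have : (0 : Int) ≤ (m : Int) + 1 := by positivity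
      push_cast at hk2
      omega
    cases fuel with
    | zero => exfalso; simp at hfuel; omega
    | succ f =>
      have hq := pyGet?_eq_some_getD cs k ' ' ⟨hk1, hklt⟩
      rw [bnRight, hq]
      dsimp only
      rw [if_pos (by simpa using hdig 0 (by omega))]
      have hcast : k + ((m + 1 : Nat) : Int) = k + 1 + (m : Int) := by push_cast; ring
      rw [hcast] at hk2 ⊢
      exact ih (k + 1) f (s ++ [PySem.List.pyGetD cs k ' ']) (by omega) hk2 (by push_cast at hfuel ⊢; omega)
        (by intro t ht
            have hcast2 : k + 1 + (t : Int) = k + ((t + 1 : Nat) : Int) := by push_cast; ring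
            rw [hcast2]
            exact hdig (t + 1) (by omega))

-- ===== VERDICT (by name: the statement is the Claim_ definition above) =====
theorem build_number_spec : Claim_unchanged_build_number := by
  intro newlines i j _ hpre hnD
  have hpre' := hpre
  unfold Pre_build_number at hpre'
  obtain ⟨hri, hrj⟩ := hpre'
  obtain ⟨row, hrow⟩ : ∃ r, PySem.List.pyGet? newlines i = some r := by
    rcases hq : PySem.List.pyGet? newlines i with _ | r
    · rw [PySem.List.pyGet?_eq_none_iff] at hq; exact absurd hri hq
    · exact ⟨r, rfl⟩
  have hrowD : PySem.List.pyGetD newlines i "" = row := by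
    simp [PySem.List.pyGetD, hrow]
  rw [hrowD] at hrj
  have hrj2 := hrj
  rw [PySem.Raise.InRange] at hrj2
  show build_number newlines i j = build_number_alt newlines i j
  unfold build_number build_number_alt
  rw [hrow]
  dsimp only
  by_cases hj : 0 ≤ j
  · have hjn : j.toNat < row.toList.length := by omega
    have hje : j = (j.toNat : Int) := by omega
    rw [hje, PySem.List.pyGet?_ofNat row.toList j.toNat hjn]
    dsimp only
    by_cases hdig : PySem.Chars.isdigit row.toList[j.toNat] = true
    · rw [if_pos hdig, if_pos hdig, bnB_digit row.toList j.toNat hjn hdig]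
      simp only [Int.toNat_natCast]
      rw [bnLeft_eq row.toList j.toNat [row.toList[j.toNat]] (le_of_lt hjn)]
      have hcast : ((j.toNat : Int)) + 1 = ((j.toNat + 1 : Nat) : Int) := by omega
      rw [hcast, bnRight_eq row.toList _ (j.toNat + 1) _ (by omega)]
      simp [List.append_assoc]
    · rw [if_neg hdig, if_neg hdig]
  · rcases hq : PySem.List.pyGet? row.toList j with _ | c
    · rfl
    · dsimp only
      by_cases hdig : PySem.Chars.isdigit c = true
      · rw [if_pos hdig, if_pos hdig, bnFind_neg j (by omega)]
        have hgd : PySem.List.pyGetD row.toList j ' ' = c := by simp [PySem.List.pyGetD, hq]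
        -- from the negation of D_: every reachable prefix-digit character is '0'
        have hzero : ∀ m : Nat, (m : Int) < (row.toList.length : Int) - j →
            (∀ t : Nat, t ≤ m →
              PySem.Chars.isdigit (PySem.List.pyGetD row.toList (j + (t : Int)) ' ') = true) →
            PySem.List.pyGetD row.toList (j + (m : Int)) ' ' = '0' := by
          intro m hm hall
          by_contra hne
          apply hnD
          unfold D_build_number bnRowD bnRowLen
          refine ⟨by omega, hri, by rw [hrowD]; exact hrj, ?_⟩
          rw [hrowD, List.any_eq_true]
          refine ⟨m, by rw [List.mem_range]; omega, ?_⟩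
          rw [Bool.and_eq_true]
          refine ⟨by simpa using hne, ?_⟩
          rw [List.all_eq_true]
          intro t ht
          rw [List.mem_range] at ht
          exact hall t (by omega)
        have hleft : bnLeft row.toList j.toNat [c] = [c] := by
          have h0 : j.toNat = 0 := by omega
          rw [h0]
          rfl
        rw [hleft]
        apply intOfDigits_zero
        intro x hx
        rcases bnRight_mem row.toList _ _ _ x hx with hxs | ⟨t, h1, h2, h3⟩
        · simp at hxs
          subst hxs
          have hz := hzero 0 (by omega) ?_
          · simpa [hgd] using hz
          · intro t ht
            have h0 : t = 0 := by omega
            rw [h0]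
            simpa [hgd] using hdig
        · have hdigfull : ∀ u : Nat, u ≤ t + 1 →
              PySem.Chars.isdigit (PySem.List.pyGetD row.toList (j + (u : Int)) ' ') = true := by
            intro u hu
            cases u with
            | zero => simpa [hgd] using hdig
            | succ v =>
              have hcast : j + ((v + 1 : Nat) : Int) = j + 1 + (v : Int) := by push_cast; ring
              rw [hcast]
              exact h3 v (by omega)
          have hm : ((t + 1 : Nat) : Int) < (row.toList.length : Int) - j := by
            push_cast at h1 ⊢
            omega
          have hz := hzero (t + 1) hm hdigfull
          have hcast : j + ((t + 1 : Nat) : Int) = j + 1 + (t : Int) := by push_cast; ring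
          rw [hcast] at hz
          rw [h2]
          exact hz
      · rw [if_neg hdig, if_neg hdig]

theorem build_number_changed : Claim_changed_build_number := by
  unfold Claim_changed_build_number; decide

theorem build_number_tight : Claim_exact_build_number := by
  intro newlines i j _ hpre hD
  have hpre' := hpre
  unfold Pre_build_number at hpre'
  obtain ⟨hri, hrj⟩ := hpre'
  obtain ⟨row, hrow⟩ : ∃ r, PySem.List.pyGet? newlines i = some r := by
    rcases hq : PySem.List.pyGet? newlines i with _ | r
    · rw [PySem.List.pyGet?_eq_none_iff] at hq; exact absurd hri hq
    · exact ⟨r, rfl⟩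
  have hrowD : PySem.List.pyGetD newlines i "" = row := by
    simp [PySem.List.pyGetD, hrow]
  rw [hrowD] at hrj
  have hrj2 := hrj
  rw [PySem.Raise.InRange] at hrj2
  have hD' := hD
  unfold D_build_number bnRowD bnRowLen at hD'
  obtain ⟨hj0, -, -, hany⟩ := hD'
  rw [hrowD, List.any_eq_true] at hany
  obtain ⟨m, hmr, hmb⟩ := hany
  rw [List.mem_range] at hmr
  rw [Bool.and_eq_true] at hmb
  obtain ⟨hne, hall⟩ := hmb
  have hne' : PySem.List.pyGetD row.toList (j + (m : Int)) ' ' ≠ '0' := by simpa using hne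
  rw [List.all_eq_true] at hall
  have hall' : ∀ t : Nat, t ≤ m →
      PySem.Chars.isdigit (PySem.List.pyGetD row.toList (j + (t : Int)) ' ') = true := by
    intro t ht
    exact hall t (by rw [List.mem_range]; omega)
  show build_number newlines i j ≠ build_number_alt newlines i j
  unfold build_number build_number_alt
  rw [hrow]
  dsimp only
  have hq := pyGet?_eq_some_getD row.toList j ' ' ⟨hrj2.1, hrj2.2⟩
  rw [hq]
  dsimp only
  have hgd0 : PySem.Chars.isdigit (PySem.List.pyGetD row.toList j ' ') = true := by
    have := hall' 0 (by omega)
    simpa using this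
  rw [if_pos hgd0, if_pos hgd0, bnFind_neg j hj0]
  have hleft : bnLeft row.toList j.toNat [PySem.List.pyGetD row.toList j ' ']
      = [PySem.List.pyGetD row.toList j ' '] := by
    have h0 : j.toNat = 0 := by omega
    rw [h0]
    rfl
  rw [hleft]
  have hjm : j + (m : Int) < row.toList.length := by omega
  have hdigs : ∀ x ∈ bnRight row.toList (j + 1) ((row.toList.length : Int) - (j + 1)).toNat
      [PySem.List.pyGetD row.toList j ' '], PySem.Chars.isdigit x = true := by
    apply bnRight_digits
    intro y hy
    simp at hy
    rw [hy]
    exact hgd0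
  have hmem : PySem.List.pyGetD row.toList (j + (m : Int)) ' '
      ∈ bnRight row.toList (j + 1) ((row.toList.length : Int) - (j + 1)).toNat
        [PySem.List.pyGetD row.toList j ' '] := by
    cases m with
    | zero =>
      obtain ⟨t, ht⟩ := bnRight_prefix row.toList _ (j + 1)
        [PySem.List.pyGetD row.toList j ' ']
      rw [ht]
      simp
    | succ v =>
      have hcast : j + ((v + 1 : Nat) : Int) = j + 1 + (v : Int) := by push_cast; ring
      rw [hcast]
      apply bnRight_reaches
      · omega
      · rw [← hcast]; exact hjm
      · exact Int.self_le_toNat _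
      · intro t ht
        have hcast2 : j + 1 + (t : Int) = j + ((t + 1 : Nat) : Int) := by push_cast; ring
        rw [hcast2]
        exact hall' (t + 1) (by omega)
  have hpos := intOfDigits_pos _ hdigs _ hmem hne'
  omega
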